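-- pv_equiv track=rewrite | github.com/KoryHunter37/code-mastery | interview-sites/codesignal/the-core/level-4/least-factorial/solution.py | leastFactorial
-- ===== SOURCE A (Python) =====
-- def leastFactorial(n: int) -> int:
--     def factorials():
--         i = 2
--         sum = 1
--         while True:
--             yield sum
--             sum *= i
--             i += 1
--
--     factorial_generator = factorials()
--
--     result = next(factorial_generator)
--     while result < n:
--         result = next(factorial_generator)
--
--     return result
-- ===== SOURCE B (Python) =====
-- def leastFactorial(n: int) -> int:
--     # Stage 1: find the least k with k! >= n by repeatedly CEIL-DIVIDING n
--     # by 2, 3, ... (nested ceiling divisions compose, so after dividing by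
--     # 2..k the value is ceil(n / k!), which is <= 1 exactly when k! >= n).
--     k = 1
--     m = n
--     while m > 1:
--         k += 1
--         m = -(-m // k)
--     # Stage 2: compute that one factorial.
--     result = 1
--     for i in range(2, k + 1):
--         result *= i
--     return result
-- ===== Notes on version B (the rewrite author's own statement) =====
-- stated objective: alternative
-- what changed: Instead of multiplying up a running factorial and comparing it against n each step, B divides n down by successive ceiling divisions with increasing divisors until the quotient drops to one or below (nested ceiling divisions compose, so this finds the least k with k! >= n), then computes that single factorial in a separate second pass.
import Mathlib
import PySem

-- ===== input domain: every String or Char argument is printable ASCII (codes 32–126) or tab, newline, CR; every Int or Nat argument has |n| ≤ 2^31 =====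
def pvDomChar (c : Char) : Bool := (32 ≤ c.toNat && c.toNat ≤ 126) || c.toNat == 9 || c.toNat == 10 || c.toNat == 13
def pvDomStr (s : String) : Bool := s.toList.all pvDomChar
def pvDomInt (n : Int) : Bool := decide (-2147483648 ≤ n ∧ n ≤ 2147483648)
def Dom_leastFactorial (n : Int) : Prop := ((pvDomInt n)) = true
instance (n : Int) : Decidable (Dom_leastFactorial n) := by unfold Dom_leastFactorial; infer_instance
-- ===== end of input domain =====

-- B replaces A's multiply-up scan (running factorial compared to n) by a divide-down
-- scan: ceiling-divide n by 2,3,... until the quotient is ≤ 1, then compute that one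
-- factorial in a second pass; objective: alternative.

-- ===== PORT A =====
-- A's while-loop over the generator's state (i, sum): at step k the generator has
-- yielded sum = (k+1)! and i = k+2. The invariant hypothesis `h` only justifies
-- termination; the computation is exactly A's: test `result < n`, else advance
-- `sum *= i; i += 1` and take the next yielded value.
def leastFactorialLoop (n : Int) (k : Nat) (sum : Int)
    (h : sum = (Nat.factorial (k + 1) : Int)) : Int :=
  if sum < n then
    leastFactorialLoop n (k + 1) (sum * ((k : Int) + 2))
      (by subst h; push_cast [Nat.factorial_succ]; ring)
  else sum
termination_by (n - sum).toNat
decreasing_by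
  have h1 : (1 : Int) ≤ sum := by
    rw [h]; exact_mod_cast Nat.one_le_iff_ne_zero.mpr (Nat.factorial_ne_zero _)
  have h2 : sum + 1 ≤ sum * ((k : Int) + 2) := by nlinarith [Int.natCast_nonneg k]
  omega

def leastFactorial (n : Int) : Int :=
  -- result = next(...) yields 1 = 1! (k = 0), then the while loop
  leastFactorialLoop n 0 1 (by norm_num)

-- ===== PORT B =====
-- B's while loop: while m > 1: k += 1; m = -(-m // k).  The hypothesis `hk` only
-- justifies termination (k starts at 1 and only grows).
def leastFactorialAltLoop (k m : Int) (hk : 1 ≤ k) : Int :=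
  if 1 < m then
    leastFactorialAltLoop (k + 1) (-(PySem.Int.floordiv (-m) (k + 1))) (by omega)
  else k
termination_by m.toNat
decreasing_by
  have hb : (0:Int) < k + 1 := by omega
  have h1 := PySem.Int.floordiv_mul_add_mod (-m) (k + 1)
  have h3 := PySem.Int.mod_lt (a := -m) (b := k + 1) hb
  have h4 : 1 - m ≤ PySem.Int.floordiv (-m) (k + 1) := by nlinarith
  omega

def leastFactorial_alt (n : Int) : Int :=
  -- k := the divide-down loop's result; result = 1; for i in range(2, k + 1): result *= i
  (PySem.List.pyRange 2 (leastFactorialAltLoop 1 n (by norm_num) + 1) 1).foldl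
    (fun r i => r * i) 1

-- ===== PRECONDITION & SPEC =====
def Spec_leastFactorial (n : Int) (out : Int) : Prop := out = leastFactorial_alt n
instance (n : Int) (out : Int) : Decidable (Spec_leastFactorial n out) := by unfold Spec_leastFactorial; infer_instance

-- ===== CLAIM (what is proved, stated in full; the proofs are below) =====
def Claim_equal_leastFactorial : Prop := ∀ (n : Int), Dom_leastFactorial n → Spec_leastFactorial n (leastFactorial n)

-- ===== LEMMAS AND PROOFS =====

theorem altLoop_congr {k k' m m' : Int} {hk : 1 ≤ k} {hk' : 1 ≤ k'}
    (h : k = k') (hm : m = m') :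
    leastFactorialAltLoop k m hk = leastFactorialAltLoop k' m' hk' := by
  subst h; subst hm; rfl

-- ceiling division -((-a) // b)
def pvCdiv (a b : Int) : Int := -(PySem.Int.floordiv (-a) b)

theorem cdiv_gt_one_iff (a b : Int) (hb : 0 < b) : 1 < pvCdiv a b ↔ b < a := by
  unfold pvCdiv
  constructor
  · intro h
    by_contra hle
    have : -(PySem.Int.floordiv (-a) b) = pvCdiv a b := rfl
    have h1 := (PySem.Int.neg_floordiv_neg_eq_iff_of_pos (a := a) (b := b)
      (q := -(PySem.Int.floordiv (-a) b)) hb).mp rfl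
    nlinarith [h1.1, h1.2]
  · intro h
    have h1 := (PySem.Int.neg_floordiv_neg_eq_iff_of_pos (a := a) (b := b)
      (q := -(PySem.Int.floordiv (-a) b)) hb).mp rfl
    nlinarith [h1.1, h1.2]

theorem cdiv_one (a : Int) : pvCdiv a 1 = a := by
  unfold pvCdiv
  have h1 := (PySem.Int.neg_floordiv_neg_eq_iff_of_pos (a := a) (b := 1)
    (q := -(PySem.Int.floordiv (-a) 1)) (by norm_num)).mp rfl
  omega

theorem cdiv_cdiv (a b c : Int) (hb : 0 < b) (hc : 0 < c) :
    pvCdiv (pvCdiv a b) c = pvCdiv a (b * c) := by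
  have h1 := (PySem.Int.neg_floordiv_neg_eq_iff_of_pos (a := a) (b := b)
    (q := pvCdiv a b) hb).mp rfl
  have h2 := (PySem.Int.neg_floordiv_neg_eq_iff_of_pos (a := pvCdiv a b) (b := c)
    (q := pvCdiv (pvCdiv a b) c) hc).mp rfl
  refine Eq.symm ((PySem.Int.neg_floordiv_neg_eq_iff_of_pos (a := a) (b := b * c)
    (q := pvCdiv (pvCdiv a b) c) (by positivity)).mpr ⟨?_, ?_⟩)
  · nlinarith [h1.1, h1.2, h2.1, h2.2]
  · nlinarith [h1.1, h1.2, h2.1, h2.2]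

theorem altLoop_ge (k m : Int) (hk : 1 ≤ k) : k ≤ leastFactorialAltLoop k m hk := by
  fun_induction leastFactorialAltLoop k m hk with
  | case1 k m hk hlt ih => omega
  | case2 k m hk hge => omega

-- A's loop at state (k, sum = (k+1)!) agrees with B's divide-down loop at
-- state (k+1, ceil(n / (k+1)!)), returning the factorial of B's result index.
theorem bridge (n : Int) (k : Nat) (sum : Int)
    (h : sum = (Nat.factorial (k + 1) : Int)) (hk : 1 ≤ (k : Int) + 1) :
    leastFactorialLoop n k sum h =
      (Nat.factorial (leastFactorialAltLoop ((k : Int) + 1) (pvCdiv n sum) hk).toNat : Int) := by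
  fun_induction leastFactorialLoop n k sum h with
  | case1 k hlt ih =>
    have hsum : (0:Int) < (Nat.factorial (k+1) : Int) := by exact_mod_cast Nat.factorial_pos _
    rw [ih (by push_cast; omega)]
    conv_rhs => rw [leastFactorialAltLoop]
    rw [if_pos ((cdiv_gt_one_iff n _ hsum).mpr hlt)]
    have hstep : -(PySem.Int.floordiv (-(pvCdiv n (Nat.factorial (k+1) : Int))) ((k : Int) + 1 + 1))
        = pvCdiv n ((Nat.factorial (k+1) : Int) * ((k : Int) + 2)) := by
      have := cdiv_cdiv n (Nat.factorial (k+1) : Int) ((k : Int) + 2) hsum (by positivity)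
      simpa [pvCdiv, show (k:Int)+1+1 = (k:Int)+2 by ring] using this
    have hidx : ((k+1:Nat):Int) + 1 = (k:Int)+1+1 := by push_cast; ring
    rw [altLoop_congr hidx hstep.symm]
  | case2 k hge =>
    have hsum : (0:Int) < (Nat.factorial (k+1) : Int) := by exact_mod_cast Nat.factorial_pos _
    conv_rhs => rw [leastFactorialAltLoop]
    rw [if_neg (fun hgt => hge ((cdiv_gt_one_iff n _ hsum).mp hgt))]
    have ht : ((k:Int)+1).toNat = k+1 := by omega
    rw [ht]

-- the final product pass computes the factorial of the found index
theorem prod_pyRange_factorial (j : Nat) :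
    (PySem.List.pyRange 2 ((j : Int) + 1) 1).foldl (fun r i => r * i) 1
      = (Nat.factorial j : Int) := by
  induction j with
  | zero => simp [PySem.List.pyRange, Nat.factorial]
  | succ j ih =>
    rcases Nat.eq_zero_or_pos j with hj | hj
    · subst hj
      norm_num [PySem.List.pyRange, Nat.factorial]
    · have hrange : PySem.List.pyRange 2 ((j : Int) + 1 + 1) 1
          = PySem.List.pyRange 2 ((j : Int) + 1) 1 ++ [(j : Int) + 1] := by
        have h2 : (2:Int) ≤ (j : Int) + 1 := by omega
        rw [PySem.List.pyRange_one_append 2 ((j : Int) + 1) ((j : Int) + 1 + 1) h2 (by omega),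
          PySem.List.pyRange_one_cons (a := (j : Int) + 1) (b := (j : Int) + 1 + 1) (by omega)]
        norm_num [PySem.List.pyRange]
      push_cast
      rw [hrange, List.foldl_append, ih]
      simp [Nat.factorial_succ]
      ring

-- ===== VERDICT (by name: the statement is the Claim_ definition above) =====
theorem leastFactorial_spec : Claim_equal_leastFactorial := by
  intro n _
  unfold Spec_leastFactorial leastFactorial leastFactorial_alt
  have hb := bridge n 0 1 (by norm_num) (by norm_num)
  simp only [Nat.cast_zero, zero_add, cdiv_one] at hb
  rw [hb]
  have hK : (1:Int) ≤ leastFactorialAltLoop 1 n (by norm_num) :=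
    altLoop_ge 1 n (by norm_num)
  have hKcast : ((leastFactorialAltLoop 1 n (by norm_num)).toNat : Int)
      = leastFactorialAltLoop 1 n (by norm_num) := Int.toNat_of_nonneg (by omega)
  rw [show leastFactorialAltLoop 1 n (by norm_num) + 1
      = ((leastFactorialAltLoop 1 n (by norm_num)).toNat : Int) + 1 by rw [hKcast]]
  rw [prod_pyRange_factorial]
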